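-- pv_equiv track=rewrite | github.com/cowboydaniel/Outback-CommandCore | HackAttack/scripts/sync_usb_vendors.py | insert_missing
-- ===== SOURCE A (Python) =====
-- from typing import Iterable, Tuple
--
-- def sort_key(name: str, vid: str) -> Tuple[str, str, str]:
--     return (name.lower(), name, vid)
--
-- def insert_missing(
--     existing: Iterable[Tuple[str, str]], missing: Iterable[Tuple[str, str]]
-- ) -> list[Tuple[str, str]]:
--     ordered = list(existing)
--     for vid, name in missing:
--         new_key = sort_key(name, vid)
--         inserted = False
--         for idx, (cur_vid, cur_name) in enumerate(ordered):
--             if sort_key(cur_name, cur_vid) > new_key: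
--                 ordered.insert(idx, (vid, name))
--                 inserted = True
--                 break
--         if not inserted:
--             ordered.append((vid, name))
--     return ordered
-- ===== SOURCE B (Python) =====
-- from typing import Iterable, Tuple
--
-- def sort_key(name: str, vid: str) -> Tuple[str, str, str]:
--     return (name.lower(), name, vid)
--
-- def insert_missing(
--     existing: Iterable[Tuple[str, str]], missing: Iterable[Tuple[str, str]]
-- ) -> list[Tuple[str, str]]:
--     # Stable-sort the missing entries once, then interleave them into the
--     # existing list in a single merge-style pass.
--     pending = sorted(missing, key=lambda item: sort_key(item[1], item[0]))
--     out = []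
--     j = 0
--     for vid, name in existing:
--         cur = sort_key(name, vid)
--         while j < len(pending) and sort_key(pending[j][1], pending[j][0]) < cur:
--             out.append(pending[j])
--             j += 1
--         out.append((vid, name))
--     out.extend(pending[j:])
--     return out
-- ===== Notes on version B (the rewrite author's own statement) =====
-- stated objective: faster
-- what changed: Instead of repeatedly scanning the growing list from the front and list.insert-ing each missing entry (O((n+m)*m)), B stable-sorts the missing entries once by sort_key and interleaves them into the existing list in a single merge-style pass; this matches A exactly even when the existing list is not sorted, because each of A's insertions goes before the first strictly-greater element.
import Mathlib
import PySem

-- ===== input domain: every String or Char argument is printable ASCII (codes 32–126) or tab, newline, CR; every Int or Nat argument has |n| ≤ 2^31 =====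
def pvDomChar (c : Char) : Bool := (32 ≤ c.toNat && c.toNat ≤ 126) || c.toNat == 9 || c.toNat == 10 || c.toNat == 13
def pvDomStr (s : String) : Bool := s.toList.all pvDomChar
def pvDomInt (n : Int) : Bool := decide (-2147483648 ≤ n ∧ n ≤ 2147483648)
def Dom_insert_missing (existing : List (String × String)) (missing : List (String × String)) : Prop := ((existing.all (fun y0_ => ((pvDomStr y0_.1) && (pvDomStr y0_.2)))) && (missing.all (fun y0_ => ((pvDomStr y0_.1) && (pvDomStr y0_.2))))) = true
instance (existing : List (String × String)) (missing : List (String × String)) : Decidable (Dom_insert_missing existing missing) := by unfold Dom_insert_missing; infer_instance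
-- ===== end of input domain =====

-- B replaces A's per-item front-to-back insertion scans by one stable sort of `missing` plus a single merge pass (faster; return value proved equal on all inputs).

-- sort_key(name, vid) = (name.lower(), name, vid); Python compares such tuples lexicographically
-- (Python's str '<' is Lean's String '<', see PYSEM.md). On Dom_insert_missing every character has
-- code ≥ 9, so joining the three components with the separator '\x00' (strictly below every Dom
-- character) gives a single string whose lexicographic order is EXACTLY the tuple order; both ports
-- compare keys only through this one encoding.
abbrev pvKey : Type := String

def sortKey (name : String) (vid : String) : pvKey :=
  PySem.Str.lower name ++ "\x00" ++ name ++ "\x00" ++ vid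

-- ===== PORT A =====
-- inner 'for idx, (cur_vid, cur_name) in enumerate(ordered): if …: break' = first index whose key exceeds new_key
def pvFindSpot (pairs : List (Int × (String × String))) (newKey : pvKey) : Option Int :=
  match pairs with
  | [] => none
  | (idx, (cur_vid, cur_name)) :: rest =>
    if sortKey cur_name cur_vid > newKey then some idx else pvFindSpot rest newKey

-- one iteration of A's outer loop: insert at the found index, else append ('inserted' flag)
def pvInsertOne (ordered : List (String × String)) (vid : String) (name : String) : List (String × String) :=
  match pvFindSpot (PySem.List.enumerate ordered 0) (sortKey name vid) with
  | some idx => PySem.List.insert ordered idx (vid, name)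
  | none => ordered ++ [(vid, name)]

def insert_missing (existing : List (String × String)) (missing : List (String × String)) : List (String × String) :=
  missing.foldl (fun ordered item => pvInsertOne ordered item.1 item.2) existing

-- ===== PORT B =====
def pvKeyLt (a : String × String) (b : String × String) : Bool :=
  decide (sortKey a.2 a.1 < sortKey b.2 b.1)

-- the for-loop over `existing` with pointer j into `pending`, plus the final extend(pending[j:])
def pvMerge (ordered : List (String × String)) (pending : List (String × String)) : List (String × String) :=
  match ordered with
  | [] => pending
  | e :: rest =>
    pending.takeWhile (fun m => pvKeyLt m e) ++ e :: pvMerge rest (pending.dropWhile (fun m => pvKeyLt m e))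

def insert_missing_alt (existing : List (String × String)) (missing : List (String × String)) : List (String × String) :=
  pvMerge existing (PySem.List.sorted missing (fun item => sortKey item.2 item.1) false)

-- ===== PRECONDITION & SPEC =====
def Spec_insert_missing (existing : List (String × String)) (missing : List (String × String)) (out : List (String × String)) : Prop := out = insert_missing_alt existing missing
instance (existing : List (String × String)) (missing : List (String × String)) (out : List (String × String)) : Decidable (Spec_insert_missing existing missing out) := by unfold Spec_insert_missing; infer_instance

-- ===== CLAIM (what is proved, stated in full; the proofs are below) =====
def Claim_equal_insert_missing : Prop := ∀ (existing : List (String × String)) (missing : List (String × String)), Dom_insert_missing existing missing → Spec_insert_missing existing missing (insert_missing existing missing)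

-- ===== LEMMAS AND PROOFS =====

-- '≤-insert': where a stably-sorted list receives an element that came EARLIER in the original order
def pvKeyLe (a : String × String) (b : String × String) : Bool :=
  decide (sortKey a.2 a.1 ≤ sortKey b.2 b.1)

-- proof-side mirror of A's inner scan: index (as a Nat) of the first strictly greater element
def pvSpotN (ordered : List (String × String)) (k : pvKey) : Option Nat :=
  match ordered with
  | [] => none
  | e :: rest => if sortKey e.2 e.1 > k then some 0 else (pvSpotN rest k).map (· + 1)

theorem pvFindSpot_enum (ordered : List (String × String)) (k : pvKey) (s : Int) :
    pvFindSpot (PySem.List.enumerate ordered s) k = (pvSpotN ordered k).map (fun n => (n : Int) + s) := by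
  induction ordered generalizing s with
  | nil => rfl
  | cons e rest ih =>
    simp only [PySem.List.enumerate, pvFindSpot, pvSpotN]
    split_ifs with h
    · simp
    · rw [ih (s + 1)]
      cases pvSpotN rest k with
      | none => simp
      | some n => simp; omega

theorem pvSpotN_le (ordered : List (String × String)) (k : pvKey) (n : Nat)
    (h : pvSpotN ordered k = some n) : n ≤ ordered.length := by
  induction ordered generalizing n with
  | nil => simp [pvSpotN] at h
  | cons e rest ih =>
    simp only [pvSpotN] at h
    split_ifs at h with hc
    · simp at h; omega
    · cases hr : pvSpotN rest k with
      | none => rw [hr] at h; simp at h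
      | some m => rw [hr] at h; simp at h; have := ih m hr; simp [List.length_cons]; omega

theorem pvInsert_natCast (xs : List (String × String)) (n : Nat) (v : String × String)
    (h : n ≤ xs.length) : PySem.List.insert xs (n : Int) v = xs.take n ++ v :: xs.drop n := by
  simp only [PySem.List.insert, PySem.List.sliceIndices]
  norm_num
  have h2 : (if (n : Int) < 0 then max ((n : Int) + ↑xs.length) 0 else min (n : Int) ↑xs.length).toNat = n := by
    rw [if_neg (by omega)]; omega
  rw [h2]

theorem pvInsertBy_spot (ordered : List (String × String)) (x : String × String) :
    PySem.List.insertBy pvKeyLt x ordered =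
      match pvSpotN ordered (sortKey x.2 x.1) with
      | some n => ordered.take n ++ x :: ordered.drop n
      | none => ordered ++ [x] := by
  induction ordered with
  | nil => rfl
  | cons e rest ih =>
    simp only [PySem.List.insertBy, pvSpotN]
    by_cases h : sortKey x.2 x.1 < sortKey e.2 e.1
    · rw [if_pos (by simp [pvKeyLt, h]), if_pos h]
      simp
    · rw [if_neg (by simp [pvKeyLt, h]), if_neg h, ih]
      cases pvSpotN rest (sortKey x.2 x.1) <;> simp

theorem pvInsertOne_eq_insertBy (ordered : List (String × String)) (x : String × String) :
    pvInsertOne ordered x.1 x.2 = PySem.List.insertBy pvKeyLt x ordered := by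
  unfold pvInsertOne
  rw [pvFindSpot_enum ordered (sortKey x.2 x.1) 0, pvInsertBy_spot]
  cases hs : pvSpotN ordered (sortKey x.2 x.1) with
  | none => rfl
  | some n =>
    simp [pvInsert_natCast ordered n x (pvSpotN_le ordered _ n hs)]

theorem pvMerge_nil (L : List (String × String)) : pvMerge L [] = L := by
  induction L with
  | nil => rfl
  | cons e rest ih => simp [pvMerge, ih]

theorem pvLt_true {a b : String × String} (h : sortKey a.2 a.1 < sortKey b.2 b.1) : pvKeyLt a b = true := by
  simp [pvKeyLt, h]

theorem pvLt_false {a b : String × String} (h : ¬ sortKey a.2 a.1 < sortKey b.2 b.1) : pvKeyLt a b = false := by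
  simp [pvKeyLt, h]

theorem pvLe_true {a b : String × String} (h : sortKey a.2 a.1 ≤ sortKey b.2 b.1) : pvKeyLe a b = true := by
  simp [pvKeyLe, h]

theorem pvLe_false {a b : String × String} (h : ¬ sortKey a.2 a.1 ≤ sortKey b.2 b.1) : pvKeyLe a b = false := by
  simp [pvKeyLe, h]

theorem pvInsertBy_comm (acc : List (String × String)) (x m : String × String) :
    PySem.List.insertBy pvKeyLt x (PySem.List.insertBy pvKeyLe m acc) =
      PySem.List.insertBy pvKeyLe m (PySem.List.insertBy pvKeyLt x acc) := by
  induction acc with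
  | nil =>
    rcases lt_or_ge (sortKey x.2 x.1) (sortKey m.2 m.1) with h | h
    · simp [PySem.List.insertBy, pvLt_true h, pvLe_false (not_le.mpr h)]
    · simp [PySem.List.insertBy, pvLt_false (not_lt.mpr h), pvLe_true h]
  | cons a as ih =>
    by_cases h1 : sortKey x.2 x.1 < sortKey m.2 m.1
    · by_cases h2 : sortKey m.2 m.1 ≤ sortKey a.2 a.1
      · by_cases h3 : sortKey x.2 x.1 < sortKey a.2 a.1
        · simp [PySem.List.insertBy, pvLt_true h1, pvLe_true h2, pvLt_true h3,
            pvLe_false (not_le.mpr h1)]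
        · exact absurd (lt_of_lt_of_le h1 h2) h3
      · by_cases h3 : sortKey x.2 x.1 < sortKey a.2 a.1
        · simp [PySem.List.insertBy, pvLe_false h2, pvLt_true h3,
            pvLe_false (not_le.mpr h1)]
        · simp [PySem.List.insertBy, pvLe_false h2, pvLt_false h3, ih]
    · by_cases h2 : sortKey m.2 m.1 ≤ sortKey a.2 a.1
      · by_cases h3 : sortKey x.2 x.1 < sortKey a.2 a.1
        · simp [PySem.List.insertBy, pvLt_false h1, pvLe_true h2, pvLt_true h3,
            pvLe_true (not_lt.mp h1)]
        · simp [PySem.List.insertBy, pvLt_false h1, pvLe_true h2, pvLt_false h3]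
      · by_cases h3 : sortKey x.2 x.1 < sortKey a.2 a.1
        · exact absurd (lt_of_le_of_lt (not_lt.mp h1) h3) (lt_asymm (not_le.mp h2))
        · simp [PySem.List.insertBy, pvLe_false h2, pvLt_false h3, ih]

theorem pvFoldl_insertLe (ms : List (String × String)) (acc : List (String × String)) (m : String × String) :
    ms.foldl (fun acc x => PySem.List.insertBy pvKeyLt x acc) (PySem.List.insertBy pvKeyLe m acc) =
      PySem.List.insertBy pvKeyLe m (ms.foldl (fun acc x => PySem.List.insertBy pvKeyLt x acc) acc) := by
  induction ms generalizing acc with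
  | nil => rfl
  | cons y ys ih => simp only [List.foldl_cons, pvInsertBy_comm, ih]

theorem pvSorted_eq_foldl (ms : List (String × String)) :
    PySem.List.sorted ms (fun item => sortKey item.2 item.1) false =
      ms.foldl (fun acc x => PySem.List.insertBy pvKeyLt x acc) [] := by
  rw [PySem.List.sorted_eq_foldl_insertBy]
  rfl

theorem pvSorted_cons (m : String × String) (ms : List (String × String)) :
    PySem.List.sorted (m :: ms) (fun item => sortKey item.2 item.1) false =
      PySem.List.insertBy pvKeyLe m (PySem.List.sorted ms (fun item => sortKey item.2 item.1) false) := by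
  rw [pvSorted_eq_foldl, pvSorted_eq_foldl, List.foldl_cons]
  have h1 : PySem.List.insertBy pvKeyLt m [] = PySem.List.insertBy pvKeyLe m [] := rfl
  rw [h1, pvFoldl_insertLe]

-- 'insert by ≤' is: the strictly-smaller prefix, then the element, then the rest
theorem pvInsertLe_split (m : String × String) (P : List (String × String)) :
    PySem.List.insertBy pvKeyLe m P =
      P.takeWhile (fun p => pvKeyLt p m) ++ m :: P.dropWhile (fun p => pvKeyLt p m) := by
  induction P with
  | nil => rfl
  | cons p ps ih =>
    by_cases h : sortKey m.2 m.1 ≤ sortKey p.2 p.1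
    · simp [PySem.List.insertBy, pvLe_true h, pvLt_false (not_lt.mpr h)]
    · simp [PySem.List.insertBy, pvLe_false h, pvLt_true (not_le.mp h), ih]

-- inserting m with e ≤ m does not disturb the strictly-below-e prefix
theorem pvInsertLe_commute_split (m e : String × String) (P : List (String × String))
    (h : ¬ sortKey m.2 m.1 < sortKey e.2 e.1) :
    P.takeWhile (fun p => pvKeyLt p e) = (PySem.List.insertBy pvKeyLe m P).takeWhile (fun p => pvKeyLt p e) ∧
    (PySem.List.insertBy pvKeyLe m P).dropWhile (fun p => pvKeyLt p e) =
      PySem.List.insertBy pvKeyLe m (P.dropWhile (fun p => pvKeyLt p e)) := by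
  induction P with
  | nil => simp [PySem.List.insertBy, pvLt_false h]
  | cons p ps ih =>
    by_cases hmp : sortKey m.2 m.1 ≤ sortKey p.2 p.1
    · have hpe : ¬ sortKey p.2 p.1 < sortKey e.2 e.1 := fun hc => h (lt_of_le_of_lt hmp hc)
      simp [PySem.List.insertBy, pvLe_true hmp, pvLt_false h, pvLt_false hpe]
    · by_cases hpe : sortKey p.2 p.1 < sortKey e.2 e.1
      · simp only [PySem.List.insertBy, pvLe_false hmp, Bool.false_eq_true, if_false,
          List.takeWhile_cons, List.dropWhile_cons, pvLt_true hpe, if_true]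
        exact ⟨by rw [ih.1], ih.2⟩
      · simp [PySem.List.insertBy, pvLe_false hmp, pvLt_false hpe]

theorem pvMerge_insert (L : List (String × String)) (pending : List (String × String)) (m : String × String) :
    pvMerge (PySem.List.insertBy pvKeyLt m L) pending = pvMerge L (PySem.List.insertBy pvKeyLe m pending) := by
  induction L generalizing pending with
  | nil =>
    simp only [PySem.List.insertBy, pvMerge]
    rw [pvInsertLe_split]
  | cons e rest ih =>
    by_cases hme : sortKey m.2 m.1 < sortKey e.2 e.1
    · rw [show PySem.List.insertBy pvKeyLt m (e :: rest) = m :: e :: rest by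
        simp [PySem.List.insertBy, pvLt_true hme]]
      simp only [pvMerge]
      rw [pvInsertLe_split]
      have hpref' : ∀ p ∈ pending.takeWhile (fun p => pvKeyLt p m),
          (fun p => pvKeyLt p e) p = true := by
        intro p hp
        have hpm := List.mem_takeWhile_imp hp
        simp only [pvKeyLt, decide_eq_true_eq] at hpm ⊢
        exact lt_trans hpm hme
      rw [List.takeWhile_append_of_pos hpref', List.dropWhile_append_of_pos hpref']
      simp [pvLt_true hme]
    · rw [show PySem.List.insertBy pvKeyLt m (e :: rest) = e :: PySem.List.insertBy pvKeyLt m rest by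
        simp [PySem.List.insertBy, pvLt_false hme]]
      simp only [pvMerge]
      obtain ⟨htk, hdw⟩ := pvInsertLe_commute_split m e pending hme
      rw [ih, ← htk, hdw]

theorem pvMain (ms : List (String × String)) (L : List (String × String)) :
    ms.foldl (fun acc x => PySem.List.insertBy pvKeyLt x acc) L =
      pvMerge L (PySem.List.sorted ms (fun item => sortKey item.2 item.1) false) := by
  induction ms generalizing L with
  | nil => simp [PySem.List.sorted, pvMerge_nil]
  | cons m ms ih =>
    simp only [List.foldl_cons, ih, pvSorted_cons, pvMerge_insert]

-- ===== VERDICT (by name: the statement is the Claim_ definition above) =====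
theorem insert_missing_spec : Claim_equal_insert_missing := by
  intro existing missing _
  unfold Spec_insert_missing insert_missing insert_missing_alt
  have h : (fun (ordered : List (String × String)) (item : String × String) => pvInsertOne ordered item.1 item.2)
      = (fun acc x => PySem.List.insertBy pvKeyLt x acc) :=
    funext fun a => funext fun x => pvInsertOne_eq_insertBy a x
  rw [h, pvMain]
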